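-- pv_equiv track=rewrite | github.com/lemonsis/Oracle_Benchmark | platforms/encryption/hard/positional_keyword_cipher_final.py | blackbox
-- ===== SOURCE A (Python) =====
-- def blackbox(plaintext):
--     # Positional keyword cipher with keyword 'Jackal'
--     keyword = 'Jackal'
--     # Build letter to value and value to letter mappings
--     letters = [chr(i) for i in range(ord('A'), ord('Z')+1)] + [chr(i) for i in range(ord('a'), ord('z')+1)]
--     letter_to_value = {ch: idx for idx, ch in enumerate(letters)}
--     value_to_letter = {idx: ch for idx, ch in enumerate(letters)}
--     ciphertext_chars = []
--     keyword_len = len(keyword)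
--     keyword_idx = 0
--     for ch in plaintext:
--         if ch.isalpha():
--             k_ch = keyword[keyword_idx % keyword_len]
--             p_val = letter_to_value[ch]
--             k_val = letter_to_value[k_ch]
--             c_val = (p_val + k_val) % 52
--             c_ch = value_to_letter[c_val]
--             ciphertext_chars.append(c_ch)
--             keyword_idx += 1
--         elif ch == ' ':
--             ciphertext_chars.append(' ')
--     ciphertext = ''.join(ciphertext_chars)
--     return ciphertext
-- ===== SOURCE B (Python) =====
-- def blackbox(plaintext):
--     # Two-pass decomposition: precompute keyword values once, cipher the alpha
--     # stream in one comprehension, then rebuild the output along the plaintext.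
--     keyword = 'Jackal'
--     letters = [chr(i) for i in range(ord('A'), ord('Z')+1)] + [chr(i) for i in range(ord('a'), ord('z')+1)]
--     val = {ch: idx for idx, ch in enumerate(letters)}
--     kvals = [val[c] for c in keyword]
--     n = len(kvals)
--     alphas = [c for c in plaintext if c.isalpha()]
--     ciphered = [letters[(val[p] + kvals[i % n]) % 52] for i, p in enumerate(alphas)]
--     it = iter(ciphered)
--     out = []
--     for ch in plaintext:
--         if ch.isalpha():
--             out.append(next(it))
--         elif ch == ' ':
--             out.append(' ')
--     return ''.join(out)
-- ===== Notes on version B (the rewrite author's own statement) =====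
-- stated objective: alternative
-- what changed: Replaces A's single loop with a manual keyword_idx counter by a two-pass decomposition: precompute the keyword's numeric values once, cipher the filtered alpha stream in one enumerate-comprehension (list indexing instead of the value_to_letter dict), then rebuild the output by walking the plaintext and drawing ciphered letters from an iterator.
import Mathlib
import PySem

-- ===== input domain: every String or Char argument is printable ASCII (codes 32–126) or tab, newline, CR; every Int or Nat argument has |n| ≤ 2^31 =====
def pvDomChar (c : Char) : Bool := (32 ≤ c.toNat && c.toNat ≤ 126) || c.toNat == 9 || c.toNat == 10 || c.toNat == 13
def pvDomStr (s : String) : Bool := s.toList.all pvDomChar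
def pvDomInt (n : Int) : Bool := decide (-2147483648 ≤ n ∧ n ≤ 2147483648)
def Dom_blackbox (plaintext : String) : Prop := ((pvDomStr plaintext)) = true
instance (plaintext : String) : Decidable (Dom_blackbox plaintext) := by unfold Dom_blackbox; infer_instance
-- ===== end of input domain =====

-- B replaces A's single counter-driven loop by a two-pass decomposition
-- (cipher the alpha stream once, then rebuild along the plaintext); same cost.
-- Dict lookups that Python writes d[k] are ported as (get? …).getD: on the
-- Dom_blackbox inputs the claim covers, isalpha chars are ASCII letters and the
-- key is always present, so the default is never used.

-- ===== PORT A =====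
def aLetters : List Char :=
  (PySem.List.pyRange 65 91 1).map (fun i => Char.ofNat i.toNat)
    ++ (PySem.List.pyRange 97 123 1).map (fun i => Char.ofNat i.toNat)

def aLetterToValue : PySem.Dict Char Int :=
  PySem.Dict.ofList ((PySem.List.enumerate aLetters).map (fun p => (p.2, p.1)))

def aValueToLetter : PySem.Dict Int Char :=
  PySem.Dict.ofList (PySem.List.enumerate aLetters)

-- A's for-loop: state = (ciphertext_chars, keyword_idx)
def aLoop : List Char → Int → List Char → List Char
  | [], _, acc => acc
  | ch :: rest, kidx, acc =>
      if PySem.Chars.isalpha ch then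
        let kch := PySem.List.pyGetD ("Jackal".toList) (PySem.Int.mod kidx ("Jackal".toList.length : Int)) 'A'
        let pval := (aLetterToValue.get? ch).getD 0
        let kval := (aLetterToValue.get? kch).getD 0
        let cval := PySem.Int.mod (pval + kval) 52
        let cch := (aValueToLetter.get? cval).getD ' '
        aLoop rest (kidx + 1) (acc ++ [cch])
      else if ch = ' ' then
        aLoop rest kidx (acc ++ [' '])
      else
        aLoop rest kidx acc

def blackbox (plaintext : String) : String :=
  String.ofList (aLoop plaintext.toList 0 [])

-- ===== PORT B =====
def bLetters : List Char :=
  (PySem.List.pyRange 65 91 1).map (fun i => Char.ofNat i.toNat)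
    ++ (PySem.List.pyRange 97 123 1).map (fun i => Char.ofNat i.toNat)

def bVal : PySem.Dict Char Int :=
  PySem.Dict.ofList ((PySem.List.enumerate bLetters).map (fun p => (p.2, p.1)))

def bKvals : List Int := "Jackal".toList.map (fun c => (bVal.get? c).getD 0)

-- one ciphered letter for the (index, alpha-char) pair
def bCipherChar (p : Int × Char) : Char :=
  PySem.List.pyGetD bLetters
    (PySem.Int.mod ((bVal.get? p.2).getD 0 + PySem.List.pyGetD bKvals (PySem.Int.mod p.1 (bKvals.length : Int)) 0) 52) ' '

-- second pass: walk the plaintext, drawing ciphered letters from the stream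
def bRebuild : List Char → List Char → List Char
  | [], _ => []
  | ch :: rest, stream =>
      if PySem.Chars.isalpha ch then
        stream.headD ' ' :: bRebuild rest stream.tail
      else if ch = ' ' then
        ' ' :: bRebuild rest stream
      else
        bRebuild rest stream

def blackbox_alt (plaintext : String) : String :=
  String.ofList (bRebuild plaintext.toList
    ((PySem.List.enumerate (plaintext.toList.filter PySem.Chars.isalpha)).map bCipherChar))

-- ===== PRECONDITION & SPEC =====
def Spec_blackbox (plaintext : String) (out : String) : Prop := out = blackbox_alt plaintext
instance (plaintext : String) (out : String) : Decidable (Spec_blackbox plaintext out) := by unfold Spec_blackbox; infer_instance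

-- ===== CLAIM (what is proved, stated in full; the proofs are below) =====
def Claim_equal_blackbox : Prop := ∀ (plaintext : String), Dom_blackbox plaintext → Spec_blackbox plaintext (blackbox plaintext)

-- ===== LEMMAS AND PROOFS =====

-- the per-character cipher value as A computes it
def aCipherChar (ch : Char) (kidx : Int) : Char :=
  (aValueToLetter.get? (PySem.Int.mod
      ((aLetterToValue.get? ch).getD 0
        + (aLetterToValue.get? (PySem.List.pyGetD ("Jackal".toList) (PySem.Int.mod kidx ("Jackal".toList.length : Int)) 'A')).getD 0) 52)).getD ' '

-- A's and B's per-character formulas agree (any char, any index)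
set_option maxRecDepth 8192 in
lemma cipherChar_eq (ch : Char) (kidx : Int) : aCipherChar ch kidx = bCipherChar (kidx, ch) := by
  have h6 : ("Jackal".toList.length : Int) = 6 := by decide
  have hk : PySem.List.pyGetD bKvals (PySem.Int.mod kidx (bKvals.length : Int)) 0
      = (aLetterToValue.get? (PySem.List.pyGetD ("Jackal".toList) (PySem.Int.mod kidx ("Jackal".toList.length : Int)) 'A')).getD 0 := by
    have hlen : (bKvals.length : Int) = 6 := by decide
    have h0 : (0:Int) ≤ PySem.Int.mod kidx 6 := PySem.Int.mod_nonneg kidx (by omega : (0:Int) < 6)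
    have h1 : PySem.Int.mod kidx 6 < 6 := PySem.Int.mod_lt kidx (by omega : (0:Int) < 6)
    rw [hlen, h6]
    set m := PySem.Int.mod kidx 6 with hm
    have : m = ((m.toNat : Nat) : Int) := by omega
    rw [this]
    have hlt : m.toNat < 6 := by omega
    interval_cases h : m.toNat <;> decide
  unfold aCipherChar bCipherChar
  rw [hk]
  have hab : aLetterToValue = bVal := rfl
  rw [hab]
  set v := PySem.Int.mod ((bVal.get? ch).getD 0
      + (bVal.get? (PySem.List.pyGetD ("Jackal".toList) (PySem.Int.mod kidx ("Jackal".toList.length : Int)) 'A')).getD 0) 52 with hv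
  have h0 : (0:Int) ≤ v := PySem.Int.mod_nonneg _ (by omega : (0:Int) < 52)
  have h1 : v < 52 := PySem.Int.mod_lt _ (by omega : (0:Int) < 52)
  have hval : ∀ n : Nat, n < 52 →
      (aValueToLetter.get? ((n : Nat) : Int)).getD ' ' = PySem.List.pyGetD bLetters ((n : Nat) : Int) ' ' := by decide
  have : v = ((v.toNat : Nat) : Int) := by omega
  rw [this]
  exact hval v.toNat (by omega)

lemma isalpha_space : PySem.Chars.isalpha ' ' = false := by decide

-- the common specification: the cipher stream interleaved back into the text
def spec : List Char → Int → List Char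
  | [], _ => []
  | ch :: rest, kidx =>
      if PySem.Chars.isalpha ch then aCipherChar ch kidx :: spec rest (kidx + 1)
      else if ch = ' ' then ' ' :: spec rest kidx
      else spec rest kidx

lemma aLoop_eq_spec (cs : List Char) (kidx : Int) (acc : List Char) :
    aLoop cs kidx acc = acc ++ spec cs kidx := by
  induction cs generalizing kidx acc with
  | nil => simp [aLoop, spec]
  | cons ch rest ih =>
      cases ha : PySem.Chars.isalpha ch
      · by_cases hs : ch = ' '
        · simp [aLoop, spec, hs, ih, isalpha_space]
        · simp [aLoop, spec, ha, hs, ih]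
      · simp [aLoop, spec, ha, ih, aCipherChar]

lemma bRebuild_eq_spec (cs : List Char) (s : Int) :
    bRebuild cs ((PySem.List.enumerate (cs.filter PySem.Chars.isalpha) s).map bCipherChar)
      = spec cs s := by
  induction cs generalizing s with
  | nil => simp [bRebuild, spec]
  | cons ch rest ih =>
      cases ha : PySem.Chars.isalpha ch
      · by_cases hs : ch = ' '
        · simp [bRebuild, spec, hs, ih, isalpha_space]
        · simp [bRebuild, spec, ha, hs, ih]
      · simp only [List.filter_cons, ha, if_true, PySem.List.enumerate_cons, List.map_cons]
        simp [bRebuild, spec, ha, ih, cipherChar_eq]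

-- ===== VERDICT (by name: the statement is the Claim_ definition above) =====
theorem blackbox_spec : Claim_equal_blackbox := by
  intro plaintext _
  unfold Spec_blackbox blackbox blackbox_alt
  rw [aLoop_eq_spec, bRebuild_eq_spec]
  simp
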